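-- pv_equiv track=rewrite | github.com/tgy1201/coding-test | 프로그래머스/2/131127. 할인 행사/할인 행사.py | solution
-- ===== SOURCE A (Python) =====
-- import copy
--
-- def solution(want, number, discount):
--     answer = 0
--     dd = {want[x]: number[x] for x in range(len(want))}
--
--     for i in range(0, len(discount)):
--         d = copy.deepcopy(dd)
--
--         for j in discount[i:i+10]:
--             if j in d:
--                 d[j] -= 1
--                 if d[j] == 0:
--                     del d[j]
--         if len(d) == 0:
--             answer += 1
--
--     return answer
-- ===== SOURCE B (Python) =====
-- def solution(want, number, discount):
--     # Single sliding-window pass: one running counter of the current 10-day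
--     # window plus a 'matched' tally of wanted keys whose count has reached
--     # its required amount, instead of a fresh deep-copied dict scan per day.
--     req = {}
--     for x in range(len(want)):
--         req[want[x]] = number[x]
--     cnt = {k: 0 for k in req}
--     n = len(discount)
--     matched = 0
--     for j in range(min(10, n)):
--         x = discount[j]
--         if x in cnt:
--             cnt[x] += 1
--             if cnt[x] == req[x]:
--                 matched += 1
--     answer = 0
--     for i in range(n):
--         if matched == len(req):
--             answer += 1
--         x = discount[i]
--         if x in cnt:
--             if cnt[x] == req[x]:
--                 matched -= 1
--             cnt[x] -= 1
--         if i + 10 < n: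
--             x = discount[i + 10]
--             if x in cnt:
--                 cnt[x] += 1
--                 if cnt[x] == req[x]:
--                     matched += 1
--     return answer
-- ===== Notes on version B (the rewrite author's own statement) =====
-- stated objective: alternative
-- what changed: A deep-copies the wanted-items dict and rescans a fresh 10-element slice for every day; B makes one incremental sliding-window pass, keeping a running counter of the current window and a 'matched' tally of wanted keys whose count has reached its requirement, so each day costs O(1) dict updates instead of a dict copy plus window scan.
import Mathlib
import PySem

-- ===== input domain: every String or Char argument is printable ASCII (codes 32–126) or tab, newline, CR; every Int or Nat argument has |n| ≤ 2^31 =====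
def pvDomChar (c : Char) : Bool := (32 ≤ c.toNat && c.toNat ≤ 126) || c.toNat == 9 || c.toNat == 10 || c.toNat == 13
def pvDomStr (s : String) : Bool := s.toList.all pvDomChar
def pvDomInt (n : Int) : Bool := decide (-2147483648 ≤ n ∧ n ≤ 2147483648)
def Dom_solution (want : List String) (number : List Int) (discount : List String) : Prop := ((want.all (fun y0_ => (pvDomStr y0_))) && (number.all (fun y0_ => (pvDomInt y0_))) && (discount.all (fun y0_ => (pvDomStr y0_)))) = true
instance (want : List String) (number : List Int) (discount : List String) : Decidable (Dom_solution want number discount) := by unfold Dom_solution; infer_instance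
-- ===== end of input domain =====

-- B replaces A's per-day deep-copied dict rescan with a single sliding-window pass
-- (running counter + 'matched' tally); proved to return the same count on every input where A returns.

-- ===== PORT A =====
-- inner loop of A: 'for j in discount[i:i+10]: if j in d: d[j] -= 1; if d[j] == 0: del d[j]'
def solutionInner (d : PySem.Dict String Int) (w : List String) : PySem.Dict String Int :=
  w.foldl (fun d j =>
    match d.get? j with
    | none => d
    | some v => if v - 1 = 0 then d.erase j else d.insert j (v - 1)) d

def solution (want : List String) (number : List Int) (discount : List String) : Int :=
  let dd : PySem.Dict String Int :=
    (PySem.List.pyRange 0 (PySem.List.len want) 1).foldl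
      (fun d x => d.insert (PySem.List.pyGetD want x "") (PySem.List.pyGetD number x 0)) PySem.Dict.empty
  (PySem.List.pyRange 0 (PySem.List.len discount) 1).foldl
    (fun answer i =>
      let d := solutionInner dd (PySem.List.slice discount (some i) (some (i + 10)))
      if d.size = 0 then answer + 1 else answer) 0

-- ===== PORT B =====
-- 'if x in cnt: cnt[x] += 1; if cnt[x] == req[x]: matched += 1'
def altAdd (req : PySem.Dict String Int) (s : PySem.Dict String Int × Int) (x : String) :
    PySem.Dict String Int × Int :=
  if s.1.contains x then
    let c := s.1.getD x 0 + 1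
    (s.1.insert x c, if c = req.getD x 0 then s.2 + 1 else s.2)
  else s

-- 'if x in cnt: (if cnt[x] == req[x]: matched -= 1); cnt[x] -= 1'
def altRemove (req : PySem.Dict String Int) (s : PySem.Dict String Int × Int) (x : String) :
    PySem.Dict String Int × Int :=
  if s.1.contains x then
    (s.1.insert x (s.1.getD x 0 - 1), if s.1.getD x 0 = req.getD x 0 then s.2 - 1 else s.2)
  else s

-- body of B's main loop: count the window if fully matched, drop the day leaving on the left,
-- add the day entering on the right when it exists
def altStep (req : PySem.Dict String Int) (discount : List String) (n : Int)
    (s : PySem.Dict String Int × Int × Int) (i : Int) : PySem.Dict String Int × Int × Int :=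
  let a := if s.2.1 = (req.size : Int) then s.2.2 + 1 else s.2.2
  let t := altRemove req (s.1, s.2.1) (PySem.List.pyGetD discount i "")
  let t2 := if i + 10 < n then altAdd req t (PySem.List.pyGetD discount (i + 10) "") else t
  (t2.1, t2.2, a)

def solution_alt (want : List String) (number : List Int) (discount : List String) : Int :=
  let req : PySem.Dict String Int :=
    (PySem.List.pyRange 0 (PySem.List.len want) 1).foldl
      (fun d x => d.insert (PySem.List.pyGetD want x "") (PySem.List.pyGetD number x 0)) PySem.Dict.empty
  let cnt0 : PySem.Dict String Int := req.keys.foldl (fun d k => d.insert k 0) PySem.Dict.empty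
  let n : Int := PySem.List.len discount
  let s1 := (PySem.List.pyRange 0 (min 10 n) 1).foldl
    (fun s j => altAdd req s (PySem.List.pyGetD discount j "")) (cnt0, (0 : Int))
  let s2 := (PySem.List.pyRange 0 n 1).foldl (altStep req discount n) (s1.1, s1.2, (0 : Int))
  s2.2.2

-- ===== PRECONDITION & SPEC =====
-- Pre_ excludes exactly the inputs on which Python A raises IndexError: number shorter than want.
def Pre_solution (want : List String) (number : List Int) (discount : List String) : Prop :=
  want.length ≤ number.length
instance (want : List String) (number : List Int) (discount : List String) :
    Decidable (Pre_solution want number discount) := by unfold Pre_solution; infer_instance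
def pvWitness_solution : List String × List Int × List String :=
  (["a", "b"], [2, 1], ["a", "b", "a", "c"])

def Spec_solution (want : List String) (number : List Int) (discount : List String) (out : Int) : Prop := out = solution_alt want number discount
instance (want : List String) (number : List Int) (discount : List String) (out : Int) : Decidable (Spec_solution want number discount out) := by unfold Spec_solution; infer_instance

-- ===== CLAIM (what is proved, stated in full; the proofs are below) =====
def Claim_equal_solution : Prop := ∀ (want : List String) (number : List Int) (discount : List String), Dom_solution want number discount → Pre_solution want number discount → Spec_solution want number discount (solution want number discount)

-- ===== LEMMAS AND PROOFS =====

lemma find?_filter_ne (l : List (String × Int)) (k x : String) :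
    (l.filter (fun p => !p.1 == k)).find? (fun p => p.1 == x)
      = if x = k then none else l.find? (fun p => p.1 == x) := by
  induction l with
  | nil => simp
  | cons p t ih =>
    by_cases hpk : p.1 = k
    · have hf : (p :: t).filter (fun p => !p.1 == k) = t.filter (fun p => !p.1 == k) := by
        simp [hpk]
      rw [hf, ih]
      by_cases hxk : x = k
      · simp [hxk]
      · have hpx : (p.1 == x) = false := by simp [hpk]; intro h; exact hxk h.symm
        simp only [if_neg hxk, List.find?_cons, hpx]
    · have hf : (p :: t).filter (fun p => !p.1 == k) = p :: t.filter (fun p => !p.1 == k) := by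
        simp [hpk]
      rw [hf]
      by_cases hpx : p.1 = x
      · have : (p.1 == x) = true := by simp [hpx]
        have hxk : ¬ x = k := fun h => hpk (hpx.trans h)
        simp only [List.find?_cons, this, if_neg hxk]
      · have : (p.1 == x) = false := by simp [hpx]
        simp only [List.find?_cons, this, ih]

lemma get?_erase (d : PySem.Dict String Int) (k x : String) :
    (d.erase k).get? x = if x = k then none else d.get? x := by
  obtain ⟨l⟩ := d
  show Option.map _ (List.find? _ (l.filter (fun p => !p.1 == k))) = _
  rw [find?_filter_ne]
  by_cases hxk : x = k <;> simp [hxk, PySem.Dict.get?]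

lemma size_zero_iff (e : PySem.Dict String Int) : e.size = 0 ↔ ∀ x, e.get? x = none := by
  obtain ⟨l⟩ := e
  cases l with
  | nil => simp [PySem.Dict.size, PySem.Dict.get?]
  | cons p t =>
    simp only [PySem.Dict.size, PySem.Dict.get?]
    constructor
    · intro h; simp at h
    · intro h
      have := h p.1
      simp at this

def resA (o : Option Int) (c : Int) : Option Int :=
  match o with
  | none => none
  | some v => if 1 ≤ v ∧ v ≤ c then none else some (v - c)

@[simp] lemma resA_none (c : Int) : resA none c = none := rfl

@[simp] lemma resA_some (v c : Int) : resA (some v) c = if 1 ≤ v ∧ v ≤ c then none else some (v - c) := rfl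

lemma innerA_get? (w : List String) : ∀ (d : PySem.Dict String Int) (x : String),
    (solutionInner d w).get? x = resA (d.get? x) ((w.count x : Int)) := by
  induction w with
  | nil =>
    intro d x
    show d.get? x = _
    cases h : d.get? x with
    | none => rfl
    | some v =>
      have hnc : ¬ ((1:Int) ≤ v ∧ v ≤ ((List.count x ([]:List String) : Int))) := by
        simp; omega
      simp only [List.count_nil, Nat.cast_zero] at hnc ⊢
      simp [resA_some, hnc]
  | cons j w ih =>
    intro d x
    have hstep : solutionInner d (j :: w) = solutionInner
        (match d.get? j with
         | none => d
         | some v => if v - 1 = 0 then d.erase j else d.insert j (v - 1)) w := rfl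
    rw [hstep, ih]
    by_cases hxj : x = j
    · subst hxj
      cases h : d.get? x with
      | none => simp [h]
      | some v =>
        by_cases hv1 : v - 1 = 0
        · simp only [h, if_pos hv1, get?_erase, if_pos rfl, resA_none, resA_some]
          have hc : ((x :: w).count x : Int) = (w.count x : Int) + 1 := by
            simp [List.count_cons]
          rw [hc]
          have : (1:Int) ≤ v ∧ v ≤ (w.count x : Int) + 1 := by
            constructor <;> [omega; (have := Int.natCast_nonneg (w.count x); omega)]
          simp [this]
        · simp only [h, if_neg hv1, PySem.Dict.get?_insert, if_pos rfl, resA_some]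
          have hc : ((x :: w).count x : Int) = (w.count x : Int) + 1 := by
            simp [List.count_cons]
          rw [hc]
          simp only [if_true, resA_some]
          split_ifs with h1 h2 h2 <;> first
          | rfl
          | (exfalso; omega)
          | (congr 1; omega)
    · have hc : ((j :: w).count x : Int) = (w.count x : Int) := by
        simp [List.count_cons, hxj, (Ne.symm hxj : j ≠ x)]
      cases h : d.get? j with
      | none => simp [h, hc]
      | some v =>
        by_cases hv1 : v - 1 = 0
        · simp only [h, if_pos hv1, get?_erase, if_neg hxj, hc]
        · simp only [h, if_neg hv1, PySem.Dict.get?_insert, if_neg hxj, hc]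

def winp (w : List String) (p : String × Int) : Bool :=
  decide (1 ≤ p.2 ∧ p.2 ≤ (w.count p.1 : Int))

lemma innerA_empty (R : PySem.Dict String Int) (w : List String) (hnd : R.keys.Nodup) :
    ((solutionInner R w).size = 0) ↔ (R.items.all (winp w) = true) := by
  rw [size_zero_iff, List.all_eq_true]
  constructor
  · intro h p hp
    have hg : R.get? p.1 = some p.2 :=
      (PySem.Dict.get?_eq_some_iff_mem_items R p.1 p.2 hnd).2 hp
    have := h p.1
    rw [innerA_get?, hg, resA_some] at this
    by_cases hc : 1 ≤ p.2 ∧ p.2 ≤ ((w.count p.1 : Int))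
    · exact decide_eq_true hc
    · simp [hc] at this
  · intro h x
    rw [innerA_get?]
    cases hg : R.get? x with
    | none => rfl
    | some v =>
      have hp : (x, v) ∈ R.items := (PySem.Dict.get?_eq_some_iff_mem_items R x v hnd).1 hg
      have := h (x, v) hp
      simp only [winp, decide_eq_true_eq] at this
      simp [resA_some, this]

lemma countP_delta (l : List (String × Int)) (x : String) (vx : Int)
    (hnd : (l.map Prod.fst).Nodup) (hm : (x, vx) ∈ l) (f g : String × Int → Bool)
    (hag : ∀ p ∈ l, p.1 ≠ x → f p = g p) :
    (l.countP g : Int) = (l.countP f : Int)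
      + (if g (x, vx) then 1 else 0) - (if f (x, vx) then 1 else 0) := by
  induction l with
  | nil => cases hm
  | cons p t ih =>
    rw [List.map_cons, List.nodup_cons] at hnd
    by_cases hpx : p.1 = x
    · have hpt : (x, vx) ∉ t := by
        intro hmem
        exact hnd.1 (hpx ▸ (List.mem_map.2 ⟨(x, vx), hmem, rfl⟩))
      have hp : p = (x, vx) := by
        cases hm with
        | head => rfl
        | tail _ hmem => exact absurd hmem hpt
      subst hp
      have hcongr : t.countP g = t.countP f := by
        apply List.countP_congr
        intro q hq
        have hqx : q.1 ≠ x := by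
          intro he
          exact hnd.1 (he ▸ (List.mem_map.2 ⟨q, hq, rfl⟩))
        rw [hag q (List.mem_cons_of_mem _ hq) hqx]
      rw [List.countP_cons, List.countP_cons, hcongr]
      by_cases hgp : g (x, vx) <;> by_cases hfp : f (x, vx) <;>
        simp [hgp, hfp] <;> push_cast <;> omega
    · have hmem : (x, vx) ∈ t := by
        cases hm with
        | head => exact absurd rfl hpx
        | tail _ hmem => exact hmem
      have hfg : f p = g p := hag p (List.mem_cons_self) hpx
      rw [List.countP_cons, List.countP_cons, hfg]
      have := ih hnd.2 hmem (fun q hq hqx => hag q (List.mem_cons_of_mem _ hq) hqx)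
      by_cases hgp : g p <;> simp [hgp] <;> push_cast <;> omega

def InvCM (R : PySem.Dict String Int) (w : List String) (c : PySem.Dict String Int) (mt : Int) : Prop :=
  (∀ x, c.get? x = if R.contains x then some ((w.count x : Int)) else none) ∧
  mt = (R.items.countP (winp w) : Int)

lemma count_append_one (w : List String) (x y : String) :
    ((w ++ [x]).count y : Int) = (w.count y : Int) + (if y = x then 1 else 0) := by
  by_cases h : y = x
  · simp [List.count_append, List.count_cons, h]
  · have h2 : ¬ x = y := fun hh => h hh.symm
    simp [List.count_append, List.count_cons, h, h2]

lemma count_cons_one (w : List String) (x y : String) :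
    ((x :: w).count y : Int) = (w.count y : Int) + (if y = x then 1 else 0) := by
  by_cases h : y = x
  · simp [List.count_cons, h]
  · have h2 : ¬ x = y := fun hh => h hh.symm
    simp [List.count_cons, h, h2]

lemma mem_items_getD (R : PySem.Dict String Int) (x : String) (hR : R.contains x = true) :
    (x, R.getD x 0) ∈ R.items := by
  have : (R.get? x).isSome := by rw [← PySem.Dict.contains_eq_isSome_get?]; exact hR
  obtain ⟨v, hv⟩ := Option.isSome_iff_exists.1 this
  rw [PySem.Dict.getD_of_get?_eq_some R 0 hv]
  exact PySem.Dict.mem_items_of_get?_eq_some R hv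

lemma not_mem_keys_of_not_contains (R : PySem.Dict String Int) (p : String × Int)
    (hp : p ∈ R.items) (hR : ¬ R.contains p.1 = true) : False := by
  exact hR ((PySem.Dict.contains_iff_mem_keys R p.1).2 (List.mem_map.2 ⟨p, hp, rfl⟩))

lemma inv_add (R : PySem.Dict String Int) (w : List String) (c : PySem.Dict String Int) (mt : Int)
    (hnd : R.keys.Nodup) (h : InvCM R w c mt) (x : String) :
    InvCM R (w ++ [x]) (altAdd R (c, mt) x).1 (altAdd R (c, mt) x).2 := by
  obtain ⟨hK, hM⟩ := h
  have hcc : c.contains x = R.contains x := by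
    rw [PySem.Dict.contains_eq_isSome_get?, hK]
    by_cases hR : R.contains x <;> simp [hR]
  by_cases hR : R.contains x = true
  · have hgx : c.get? x = some ((w.count x : Int)) := by rw [hK, hR]; simp
    have hgD : c.getD x 0 = (w.count x : Int) := PySem.Dict.getD_of_get?_eq_some c 0 hgx
    have hstep : altAdd R (c, mt) x =
        (c.insert x ((w.count x : Int) + 1),
         if (w.count x : Int) + 1 = R.getD x 0 then mt + 1 else mt) := by
      simp only [altAdd, hcc, hR, if_true, hgD]
    rw [hstep]
    constructor
    · intro y
      rw [PySem.Dict.get?_insert]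
      by_cases hyx : y = x
      · subst hyx
        rw [if_pos rfl, hR, count_append_one, if_pos rfl]
        simp
      · rw [if_neg hyx, hK, count_append_one, if_neg hyx, add_zero]
        
    · have hvx : (x, R.getD x 0) ∈ R.items := mem_items_getD R x hR
      have hndi : (R.items.map Prod.fst).Nodup := hnd
      have hdelta := countP_delta R.items x (R.getD x 0) hndi hvx (winp w) (winp (w ++ [x]))
        (by
          intro p hp hpx
          simp only [winp, count_append_one, if_neg hpx, add_zero])
      set vx := R.getD x 0 with hvxdef
      set cw := ((w.count x : Int)) with hcw
      have hge : 0 ≤ cw := Int.natCast_nonneg _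
      show (if cw + 1 = vx then mt + 1 else mt) = (R.items.countP (winp (w ++ [x])) : Int)
      rw [hdelta, ← hM]
      have hgval : winp (w ++ [x]) (x, vx) = decide (1 ≤ vx ∧ vx ≤ cw + 1) := by
        simp [winp, count_append_one]
        rw [hcw]
      have hfval : winp w (x, vx) = decide (1 ≤ vx ∧ vx ≤ cw) := rfl
      rw [hgval, hfval]
      simp only [decide_eq_true_eq]
      by_cases hc : cw + 1 = vx
      · have h1 : (1 ≤ vx ∧ vx ≤ cw + 1) := by omega
        have h2 : ¬ (1 ≤ vx ∧ vx ≤ cw) := by omega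
        rw [if_pos hc, if_pos h1, if_neg h2]
        ring
      · have hiff : (1 ≤ vx ∧ vx ≤ cw + 1) ↔ (1 ≤ vx ∧ vx ≤ cw) := by omega
        rw [if_neg hc]
        by_cases h1 : (1 ≤ vx ∧ vx ≤ cw)
        · rw [if_pos h1, if_pos (hiff.2 h1)]
          ring
        · rw [if_neg h1, if_neg (fun hh => h1 (hiff.1 hh))]
          ring
  · have hstep : altAdd R (c, mt) x = (c, mt) := by
      simp only [altAdd, hcc]
      rw [if_neg (by simp [hR])]
    rw [hstep]
    constructor
    · intro y
      rw [hK]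
      by_cases hRy : R.contains y = true
      · have hyx : y ≠ x := by rintro rfl; exact hR hRy
        rw [hRy, if_pos rfl, if_pos rfl, count_append_one, if_neg hyx, add_zero]
      · simp [hRy]
    · rw [hM]
      show ((R.items.countP (winp w) : Int)) = _
      norm_cast
      apply List.countP_congr
      intro p hp
      have hpx : p.1 ≠ x := by
        rintro rfl
        exact not_mem_keys_of_not_contains R p hp hR
      simp only [winp, count_append_one, if_neg hpx, add_zero]

lemma inv_remove (R : PySem.Dict String Int) (w : List String) (c : PySem.Dict String Int) (mt : Int)
    (hnd : R.keys.Nodup) (x : String) (h : InvCM R (x :: w) c mt) :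
    InvCM R w (altRemove R (c, mt) x).1 (altRemove R (c, mt) x).2 := by
  obtain ⟨hK, hM⟩ := h
  have hcc : c.contains x = R.contains x := by
    rw [PySem.Dict.contains_eq_isSome_get?, hK]
    by_cases hR : R.contains x <;> simp [hR]
  by_cases hR : R.contains x = true
  · have hgx : c.get? x = some (((x :: w).count x : Int)) := by rw [hK, hR]; simp
    have hgD : c.getD x 0 = ((x :: w).count x : Int) := PySem.Dict.getD_of_get?_eq_some c 0 hgx
    have hcx : ((x :: w).count x : Int) = (w.count x : Int) + 1 := by
      rw [count_cons_one, if_pos rfl]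
    set vx := R.getD x 0 with hvxdef
    set cw := ((w.count x : Int)) with hcw
    have hge : 0 ≤ cw := Int.natCast_nonneg _
    have hstep : altRemove R (c, mt) x =
        (c.insert x cw, if cw + 1 = vx then mt - 1 else mt) := by
      simp only [altRemove, hcc, hR, if_true, hgD, hcx]
      have : cw + 1 - 1 = cw := by omega
      rw [this, hvxdef]
    rw [hstep]
    constructor
    · intro y
      rw [PySem.Dict.get?_insert]
      by_cases hyx : y = x
      · subst hyx
        rw [if_pos rfl, hR]
        simp [hcw]
      · rw [if_neg hyx, hK, count_cons_one, if_neg hyx, add_zero]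
    · have hvx : (x, vx) ∈ R.items := mem_items_getD R x hR
      have hndi : (R.items.map Prod.fst).Nodup := hnd
      have hdelta := countP_delta R.items x vx hndi hvx (winp w) (winp (x :: w))
        (by
          intro p hp hpx
          simp only [winp, count_cons_one, if_neg hpx, add_zero])
      show (if cw + 1 = vx then mt - 1 else mt) = (R.items.countP (winp w) : Int)
      rw [hM]
      have hgval : winp (x :: w) (x, vx) = decide (1 ≤ vx ∧ vx ≤ cw + 1) := by
        simp [winp, count_cons_one]
        rw [hcw]
      have hfval : winp w (x, vx) = decide (1 ≤ vx ∧ vx ≤ cw) := rfl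
      rw [hdelta, hgval, hfval]
      simp only [decide_eq_true_eq]
      by_cases hc : cw + 1 = vx
      · have h1 : (1 ≤ vx ∧ vx ≤ cw + 1) := by omega
        have h2 : ¬ (1 ≤ vx ∧ vx ≤ cw) := by omega
        rw [if_pos hc, if_pos h1, if_neg h2]
        ring
      · have hiff : (1 ≤ vx ∧ vx ≤ cw + 1) ↔ (1 ≤ vx ∧ vx ≤ cw) := by omega
        rw [if_neg hc]
        by_cases h1 : (1 ≤ vx ∧ vx ≤ cw)
        · rw [if_pos (hiff.2 h1), if_pos h1]
          ring
        · rw [if_neg (fun hh => h1 (hiff.1 hh)), if_neg h1]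
          ring
  · have hstep : altRemove R (c, mt) x = (c, mt) := by
      simp only [altRemove, hcc]
      rw [if_neg (by simp [hR])]
    rw [hstep]
    constructor
    · intro y
      rw [hK]
      by_cases hRy : R.contains y = true
      · have hyx : y ≠ x := by rintro rfl; exact hR hRy
        rw [hRy, if_pos rfl, if_pos rfl, count_cons_one, if_neg hyx, add_zero]
      · simp [hRy]
    · rw [hM]
      show ((R.items.countP (winp (x :: w)) : Int)) = _
      norm_cast
      apply List.countP_congr
      intro p hp
      have hpx : p.1 ≠ x := by
        rintro rfl
        exact not_mem_keys_of_not_contains R p hp hR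
      simp only [winp, count_cons_one, if_neg hpx, add_zero]

lemma foldl_insert_zero_get? : ∀ (l : List String) (d : PySem.Dict String Int) (x : String),
    (l.foldl (fun d k => d.insert k 0) d).get? x = if x ∈ l then some 0 else d.get? x := by
  intro l
  induction l with
  | nil => intro d x; simp
  | cons h t ih =>
    intro d x
    rw [List.foldl_cons, ih, PySem.Dict.get?_insert]
    by_cases hx : x ∈ t
    · simp [hx]
    · by_cases hxh : x = h <;> simp [hx, hxh]

lemma inv_init (R : PySem.Dict String Int) :
    InvCM R [] (R.keys.foldl (fun d k => d.insert k 0) PySem.Dict.empty) 0 := by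
  constructor
  · intro x
    rw [foldl_insert_zero_get?]
    by_cases hx : x ∈ R.keys
    · rw [if_pos hx, if_pos ((PySem.Dict.contains_iff_mem_keys R x).2 hx)]
      simp
    · rw [if_neg hx, if_neg (fun hc => hx ((PySem.Dict.contains_iff_mem_keys R x).1 hc))]
      simp [PySem.Dict.get?_empty]
  · have : ∀ p ∈ R.items, ¬ (winp [] p = true) := by
      intro p _ hw
      simp only [winp, List.count_nil, Nat.cast_zero, decide_eq_true_eq] at hw
      omega
    rw [List.countP_eq_zero.2 this]
    simp

lemma inv_addList (R : PySem.Dict String Int) (hnd : R.keys.Nodup) :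
    ∀ (ys w : List String) (s : PySem.Dict String Int × Int), InvCM R w s.1 s.2 →
      InvCM R (w ++ ys) (ys.foldl (altAdd R) s).1 (ys.foldl (altAdd R) s).2 := by
  intro ys
  induction ys with
  | nil => intro w s h; simpa using h
  | cons y t ih =>
    intro w s h
    have h1 := inv_add R w s.1 s.2 hnd h y
    have h2 := ih (w ++ [y]) (altAdd R (s.1, s.2) y) h1
    simpa using h2

def windowL (discount : List String) (m : Nat) : List String := (discount.drop m).take 10

def goodCount (R : PySem.Dict String Int) (discount : List String) (m : Nat) : Int :=
  ((List.range m).countP (fun j => (R.items.all (winp (windowL discount j)))) : Int)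

lemma goodCount_succ (R : PySem.Dict String Int) (discount : List String) (m : Nat) :
    goodCount R discount (m + 1) = goodCount R discount m
      + (if (R.items.all (winp (windowL discount m)) = true) then 1 else 0) := by
  unfold goodCount
  rw [List.range_succ, List.countP_append]
  by_cases h : R.items.all (winp (windowL discount m)) = true <;> simp [h]

lemma matched_iff (R : PySem.Dict String Int) (w : List String) :
    (((R.items.countP (winp w) : Int)) = (R.size : Int)) ↔ (R.items.all (winp w) = true) := by
  rw [Int.natCast_inj]
  show R.items.countP (winp w) = R.items.length ↔ _
  rw [List.countP_eq_length, List.all_eq_true]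

lemma take_nine_append (l : List String) (h9 : 9 < l.length) :
    l.take 10 = l.take 9 ++ [l[9]] := by
  rw [show (10 : Nat) = 9 + 1 from rfl, List.take_succ, List.getElem?_eq_getElem h9]
  rfl

lemma step_main (R : PySem.Dict String Int) (discount : List String) (hnd : R.keys.Nodup)
    (m : Nat) (hm : m < discount.length) (s : PySem.Dict String Int × Int × Int)
    (h1 : InvCM R (windowL discount m) s.1 s.2.1) (h2 : s.2.2 = goodCount R discount m) :
    InvCM R (windowL discount (m + 1))
        (altStep R discount (PySem.List.len discount) s (m : Int)).1
        (altStep R discount (PySem.List.len discount) s (m : Int)).2.1 ∧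
      (altStep R discount (PySem.List.len discount) s (m : Int)).2.2
        = goodCount R discount (m + 1) := by
  have hx : PySem.List.pyGetD discount (m : Int) "" = discount[m] := by
    rw [PySem.List.pyGetD_natCast, List.getD_eq_getElem _ _ hm]
  have hw : windowL discount m = discount[m] :: (discount.drop (m + 1)).take 9 := by
    rw [windowL, List.drop_eq_getElem_cons hm, List.take_succ_cons]
  have hrem := inv_remove R ((discount.drop (m + 1)).take 9) s.1 s.2.1 hnd discount[m]
    (hw ▸ h1)
  constructor
  · show InvCM R _ (altStep R discount (PySem.List.len discount) s (m : Int)).1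
        (altStep R discount (PySem.List.len discount) s (m : Int)).2.1
    unfold altStep
    simp only [hx]
    by_cases hlt : ((m : Int) + 10 < PySem.List.len discount)
    · have hlt' : m + 10 < discount.length := by
        have : ((m : Int) + 10 < (discount.length : Int)) := hlt
        exact_mod_cast this
      have h9 : 9 < (discount.drop (m + 1)).length := by
        rw [List.length_drop]; omega
      have hy : PySem.List.pyGetD discount ((m : Int) + 10) "" = discount[m + 10] := by
        have : ((m : Int) + 10) = ((m + 10 : Nat) : Int) := by push_cast; ring
        rw [this, PySem.List.pyGetD_natCast, List.getD_eq_getElem _ _ hlt']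
      have hadd := inv_add R ((discount.drop (m + 1)).take 9)
        (altRemove R (s.1, s.2.1) discount[m]).1 (altRemove R (s.1, s.2.1) discount[m]).2
        hnd hrem discount[m + 10]
      have hidx : m + 1 + 9 = m + 10 := by omega
      have hweq : (discount.drop (m + 1)).take 9 ++ [discount[m + 10]]
          = windowL discount (m + 1) := by
        rw [windowL, take_nine_append _ h9]
        congr 1
        simp [List.getElem_drop, hidx]
      rw [if_pos hlt, hy]
      rw [hweq] at hadd
      exact hadd
    · have hge : discount.length ≤ m + 10 := by
        have : ¬ ((m : Int) + 10 < (discount.length : Int)) := hlt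
        omega
      have hlen : (discount.drop (m + 1)).length ≤ 9 := by
        rw [List.length_drop]; omega
      have hweq : (discount.drop (m + 1)).take 9 = windowL discount (m + 1) := by
        rw [windowL, List.take_of_length_le hlen, List.take_of_length_le (by omega)]
      rw [if_neg hlt]
      rw [hweq] at hrem
      exact hrem
  · show (if s.2.1 = (R.size : Int) then s.2.2 + 1 else s.2.2) = _
    rw [goodCount_succ, h2, h1.2]
    by_cases hall : R.items.all (winp (windowL discount m)) = true
    · rw [if_pos ((matched_iff R _).2 hall), if_pos hall]
    · rw [if_neg (fun hh => hall ((matched_iff R _).1 hh)), if_neg hall, add_zero]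

lemma main_fold (R : PySem.Dict String Int) (discount : List String) (hnd : R.keys.Nodup)
    (s0 : PySem.Dict String Int × Int × Int)
    (h1 : InvCM R (windowL discount 0) s0.1 s0.2.1) (h2 : s0.2.2 = 0) :
    ∀ (m : Nat), m ≤ discount.length →
      InvCM R (windowL discount m)
          (((List.range m).map (Nat.cast : Nat → Int)).foldl
            (altStep R discount (PySem.List.len discount)) s0).1
          (((List.range m).map (Nat.cast : Nat → Int)).foldl
            (altStep R discount (PySem.List.len discount)) s0).2.1 ∧
        (((List.range m).map (Nat.cast : Nat → Int)).foldl
          (altStep R discount (PySem.List.len discount)) s0).2.2 = goodCount R discount m := by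
  intro m
  induction m with
  | zero =>
    intro _
    refine ⟨h1, ?_⟩
    simpa [goodCount] using h2
  | succ k ih =>
    intro hk
    have ihk := ih (by omega)
    rw [List.range_succ, List.map_append, List.foldl_append]
    exact step_main R discount hnd k (by omega) _ ihk.1 ihk.2

lemma a_fold (R : PySem.Dict String Int) (discount : List String) (hnd : R.keys.Nodup) :
    ∀ (m : Nat), m ≤ discount.length → ∀ (a : Int),
      ((List.range m).map (Nat.cast : Nat → Int)).foldl
          (fun answer i =>
            let d := solutionInner R (PySem.List.slice discount (some i) (some (i + 10)))
            if d.size = 0 then answer + 1 else answer) a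
        = a + goodCount R discount m := by
  intro m
  induction m with
  | zero => intro _ a; simp [goodCount]
  | succ k ih =>
    intro hk a
    rw [List.range_succ, List.map_append, List.foldl_append, ih (by omega)]
    show (let d := solutionInner R (PySem.List.slice discount (some (k : Int)) (some ((k : Int) + 10)));
      if d.size = 0 then a + goodCount R discount k + 1 else a + goodCount R discount k)
      = a + goodCount R discount (k + 1)
    have hsl : PySem.List.slice discount (some (k : Int)) (some ((k : Int) + 10))
        = windowL discount k := by
      have h10 : ((k : Int) + 10) = ((k + 10 : Nat) : Int) := by push_cast; ring
      rw [h10, PySem.List.slice_natCast, windowL]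
      congr 1
      omega
    simp only [hsl]
    rw [goodCount_succ]
    by_cases hall : R.items.all (winp (windowL discount k)) = true
    · rw [if_pos ((innerA_empty R _ hnd).2 hall), if_pos hall]
      ring
    · rw [if_neg (fun hh => hall ((innerA_empty R _ hnd).1 hh)), if_neg hall, add_zero]

lemma fold_add_take (R : PySem.Dict String Int) (discount : List String) :
    ∀ (M : Nat), M ≤ discount.length → ∀ (s : PySem.Dict String Int × Int),
      ((List.range M).map (Nat.cast : Nat → Int)).foldl
          (fun s j => altAdd R s (PySem.List.pyGetD discount j "")) s
        = (discount.take M).foldl (altAdd R) s := by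
  intro M
  induction M with
  | zero => intro _ s; simp
  | succ k ih =>
    intro hk s
    rw [List.range_succ, List.map_append, List.foldl_append, ih (by omega)]
    have hk' : k < discount.length := by omega
    rw [List.take_succ, List.getElem?_eq_getElem hk', List.foldl_append]
    show altAdd R _ (PySem.List.pyGetD discount (k : Int) "") = _
    rw [PySem.List.pyGetD_natCast, List.getD_eq_getElem _ _ hk']
    rfl

lemma take_min_ten (discount : List String) :
    discount.take (min 10 discount.length) = discount.take 10 := by
  rcases le_total 10 discount.length with h | h
  · rw [min_eq_left h]
  · rw [min_eq_right h, List.take_length, List.take_of_length_le h]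

theorem final_eq (want : List String) (number : List Int) (discount : List String) :
    solution want number discount = solution_alt want number discount := by
  unfold solution solution_alt
  set R : PySem.Dict String Int :=
    (PySem.List.pyRange 0 (PySem.List.len want) 1).foldl
      (fun d x => d.insert (PySem.List.pyGetD want x "") (PySem.List.pyGetD number x 0))
      PySem.Dict.empty with hR
  have hnd : R.keys.Nodup := by
    rw [hR]
    exact PySem.Dict.nodup_keys_foldl_insert_key _ _ _ _ PySem.Dict.nodup_keys_empty
  have hlen : PySem.List.len discount = ((discount.length : Nat) : Int) := rfl
  have hrange : PySem.List.pyRange 0 (PySem.List.len discount) 1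
      = (List.range discount.length).map (Nat.cast : Nat → Int) := by
    rw [hlen, PySem.List.pyRange_zero_natCast]
  -- A side
  have hA : (PySem.List.pyRange 0 (PySem.List.len discount) 1).foldl
      (fun answer i =>
        let d := solutionInner R (PySem.List.slice discount (some i) (some (i + 10)))
        if d.size = 0 then answer + 1 else answer) 0
      = goodCount R discount discount.length := by
    rw [hrange, a_fold R discount hnd discount.length le_rfl 0, zero_add]
  -- B side
  have hmin : min (10 : Int) (PySem.List.len discount)
      = ((min 10 discount.length : Nat) : Int) := by
    rw [hlen]; omega
  have hs1 : (PySem.List.pyRange 0 (min 10 (PySem.List.len discount)) 1).foldl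
      (fun s j => altAdd R s (PySem.List.pyGetD discount j ""))
      (R.keys.foldl (fun d k => d.insert k 0) PySem.Dict.empty, (0 : Int))
      = (discount.take 10).foldl (altAdd R)
        (R.keys.foldl (fun d k => d.insert k 0) PySem.Dict.empty, (0 : Int)) := by
    rw [hmin, PySem.List.pyRange_zero_natCast,
      fold_add_take R discount _ (min_le_right _ _), take_min_ten]
  have hinv1 : InvCM R (windowL discount 0)
      ((discount.take 10).foldl (altAdd R)
        (R.keys.foldl (fun d k => d.insert k 0) PySem.Dict.empty, (0 : Int))).1
      ((discount.take 10).foldl (altAdd R)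
        (R.keys.foldl (fun d k => d.insert k 0) PySem.Dict.empty, (0 : Int))).2 := by
    have := inv_addList R hnd (discount.take 10) []
      (R.keys.foldl (fun d k => d.insert k 0) PySem.Dict.empty, (0 : Int))
      (inv_init R)
    simpa [windowL] using this
  have hmain := main_fold R discount hnd
    (((discount.take 10).foldl (altAdd R)
        (R.keys.foldl (fun d k => d.insert k 0) PySem.Dict.empty, (0 : Int))).1,
     ((discount.take 10).foldl (altAdd R)
        (R.keys.foldl (fun d k => d.insert k 0) PySem.Dict.empty, (0 : Int))).2,
     (0 : Int))
    hinv1 rfl discount.length le_rfl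
  rw [hA]
  show goodCount R discount discount.length = ((PySem.List.pyRange 0 (PySem.List.len discount) 1).foldl
      (altStep R discount (PySem.List.len discount)) _).2.2
  rw [hrange]
  rw [hs1]
  exact hmain.2.symm

-- ===== VERDICT (by name: the statement is the Claim_ definition above) =====
theorem solution_spec : Claim_equal_solution := by
  intro want number discount _ _
  unfold Spec_solution
  exact final_eq want number discount
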